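-- pv_equiv track=rewrite | github.com/eprover/eprover | PYTHON/learn_classes.py | find_best_coverage
-- ===== SOURCE A (Python) =====
-- def find_best_coverage(bvectors):
--     """
--     Given a set of equal lenght binary vectors (0 = Success, 1 =
--     Timeout), return the index where most of the vectors indicate
--     success and the number of successes for that index.
--     """
--     maxcov  = 0
--     bestidx = 0
--     for i in range(len(bvectors[0])):
--         cv = [1-pv[i] for pv in bvectors]
--         cov = sum(cv)
--         if cov > maxcov:
--             maxcov = cov
--             bestidx = i
--     return bestidx, maxcov
-- ===== SOURCE B (Python) =====
-- def find_best_coverage(bvectors):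
--     """
--     Given a set of equal lenght binary vectors (0 = Success, 1 =
--     Timeout), return the index where most of the vectors indicate
--     success and the number of successes for that index.
--     """
--     n = len(bvectors[0])
--     counts = [0] * n
--     for pv in bvectors:
--         counts = [counts[i] + 1 - pv[i] for i in range(n)]
--     maxcov = 0
--     bestidx = 0
--     for i, c in enumerate(counts):
--         if c > maxcov:
--             maxcov = c
--             bestidx = i
--     return bestidx, maxcov
-- ===== Notes on version B (the rewrite author's own statement) =====
-- stated objective: alternative
-- what changed: A rescans all rows for every column (building a fresh per-column list and summing it); B makes one row-major accumulation pass building a per-column counts table and then a single separate argmax scan over that table.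
import Mathlib
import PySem

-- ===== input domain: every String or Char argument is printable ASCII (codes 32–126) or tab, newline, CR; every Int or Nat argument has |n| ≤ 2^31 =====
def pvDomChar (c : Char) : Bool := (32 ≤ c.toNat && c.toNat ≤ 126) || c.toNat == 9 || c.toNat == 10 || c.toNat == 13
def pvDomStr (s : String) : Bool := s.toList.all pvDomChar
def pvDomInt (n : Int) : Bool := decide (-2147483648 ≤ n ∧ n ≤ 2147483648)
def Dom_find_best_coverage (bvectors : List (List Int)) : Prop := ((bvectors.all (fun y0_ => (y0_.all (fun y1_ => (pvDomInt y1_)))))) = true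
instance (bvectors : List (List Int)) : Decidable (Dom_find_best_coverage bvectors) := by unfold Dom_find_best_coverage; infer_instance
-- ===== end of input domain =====

-- B replaces A's per-column rescans (one list comprehension + sum per column) by a single
-- row-major accumulation pass building a counts table, followed by one argmax scan (objective: alternative).

-- ===== PORT A =====
def find_best_coverage (bvectors : List (List Int)) : Int × Int :=
  let st := (PySem.List.pyRange 0 ((PySem.List.pyGetD bvectors 0 []).length : Int) 1).foldl
    (fun (st : Int × Int) i =>
      let cv := bvectors.map (fun pv => 1 - PySem.List.pyGetD pv i 0)
      let cov := cv.sum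
      if cov > st.1 then (cov, i) else st)
    ((0 : Int), (0 : Int))
  (st.2, st.1)

-- ===== PORT B =====
def find_best_coverage_alt (bvectors : List (List Int)) : Int × Int :=
  let n : Nat := (PySem.List.pyGetD bvectors 0 []).length
  let counts := bvectors.foldl
    (fun (counts : List Int) pv =>
      (PySem.List.pyRange 0 (n : Int) 1).map
        (fun i => PySem.List.pyGetD counts i 0 + 1 - PySem.List.pyGetD pv i 0))
    (List.replicate n (0 : Int))
  let st := (PySem.List.enumerate counts).foldl
    (fun (st : Int × Int) p => if p.2 > st.1 then (p.2, p.1) else st)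
    ((0 : Int), (0 : Int))
  (st.2, st.1)

-- ===== PRECONDITION & SPEC =====
-- Pre_ excludes exactly the inputs where the Python raises IndexError:
-- an empty bvectors (bvectors[0]) or a row shorter than the first row (pv[i]).
def Pre_find_best_coverage (bvectors : List (List Int)) : Prop :=
  bvectors ≠ [] ∧ ∀ pv ∈ bvectors, (bvectors.headD []).length ≤ pv.length
instance (bvectors : List (List Int)) : Decidable (Pre_find_best_coverage bvectors) := by
  unfold Pre_find_best_coverage; infer_instance
def pvWitness_find_best_coverage : List (List Int) := [[0, 1], [1, 0], [0, 0]]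

def Spec_find_best_coverage (bvectors : List (List Int)) (out : Int × Int) : Prop := out = find_best_coverage_alt bvectors
instance (bvectors : List (List Int)) (out : Int × Int) : Decidable (Spec_find_best_coverage bvectors out) := by unfold Spec_find_best_coverage; infer_instance

-- ===== CLAIM (what is proved, stated in full; the proofs are below) =====
def Claim_equal_find_best_coverage : Prop := ∀ (bvectors : List (List Int)), Dom_find_best_coverage bvectors → Pre_find_best_coverage bvectors → Spec_find_best_coverage bvectors (find_best_coverage bvectors)

-- ===== LEMMAS AND PROOFS =====

-- per-column success sum, shared shape of both sides
def pvColSum (bvectors : List (List Int)) (i : Int) : Int :=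
  (bvectors.map (fun pv => 1 - PySem.List.pyGetD pv i 0)).sum

lemma pv_counts_char (bvectors : List (List Int)) (n : Nat) (c : Int → Int) :
    bvectors.foldl
      (fun (counts : List Int) pv =>
        (PySem.List.pyRange 0 (n : Int) 1).map
          (fun i => PySem.List.pyGetD counts i 0 + 1 - PySem.List.pyGetD pv i 0))
      ((PySem.List.pyRange 0 (n : Int) 1).map c)
    = (PySem.List.pyRange 0 (n : Int) 1).map (fun i => c i + pvColSum bvectors i) := by
  induction bvectors generalizing c with
  | nil => simp [pvColSum]
  | cons pv rest ih =>
    simp only [List.foldl_cons]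
    have hstep :
        (PySem.List.pyRange 0 (n : Int) 1).map
          (fun i => PySem.List.pyGetD ((PySem.List.pyRange 0 (n : Int) 1).map c) i 0 + 1
                    - PySem.List.pyGetD pv i 0)
        = (PySem.List.pyRange 0 (n : Int) 1).map
          (fun i => c i + (1 - PySem.List.pyGetD pv i 0)) := by
      apply List.map_congr_left
      intro i hi
      have hb := (PySem.List.mem_pyRange_one).1 hi
      rw [PySem.List.pyGetD_map_pyRange_of_nonneg c (n : Int) i 0 hb.1 hb.2]
      ring
    rw [hstep, ih (fun i => c i + (1 - PySem.List.pyGetD pv i 0))]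
    apply List.map_congr_left
    intro i _
    simp [pvColSum]
    ring

lemma pv_replicate_eq_map (n : Nat) :
    List.replicate n (0 : Int) = (PySem.List.pyRange 0 (n : Int) 1).map (fun _ => (0 : Int)) := by
  rw [PySem.List.pyRange_zero_natCast]
  simp [Function.comp_def, List.map_const']

theorem find_best_coverage_spec : Claim_equal_find_best_coverage := by
  intro bvectors _ _
  unfold Spec_find_best_coverage
  simp only [find_best_coverage, find_best_coverage_alt]
  refine congrArg (fun st : Int × Int => (st.2, st.1)) ?_
  rw [pv_replicate_eq_map, pv_counts_char]
  rw [PySem.List.enumerate_eq_map_pyRange (d := 0)]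
  simp only [PySem.List.len_eq, List.length_map, PySem.List.length_pyRange_one, sub_zero,
    Int.toNat_natCast, List.foldl_map]
  apply PySem.List.foldl_congr_mem
  intro acc x hx
  have hb := (PySem.List.mem_pyRange_one).1 hx
  rw [PySem.List.pyGetD_map_pyRange_of_nonneg _ _ _ _ hb.1 hb.2]
  simp [pvColSum]
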